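-- pv_equiv track=rewrite | github.com/alkashef/teradata-mcp-client | dq_runner.py | pick_quality_tools
-- ===== SOURCE A (Python) =====
-- from typing import Any, Dict, List
--
-- def pick_quality_tools(tools: List[Dict[str, Any]]):
--     def has_kw(t: Dict[str, Any], kws: List[str]) -> bool:
--         name = (t.get("name") or "").lower()
--         desc = (t.get("description") or "").lower()
--         return any(k in name or k in desc for k in kws)
--     t_null  = [t for t in tools if has_kw(t, ["qlty", "quality"]) and has_kw(t, ["null", "missing"])]
--     t_range = [t for t in tools if has_kw(t, ["qlty", "quality"]) and has_kw(t, ["range", "min", "max"])]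
--     t_uniq  = [t for t in tools if has_kw(t, ["qlty", "quality"]) and has_kw(t, ["unique", "uniqueness", "distinct"])]
--     if not any([t_null, t_range, t_uniq]):
--         t_null  = [t for t in tools if has_kw(t, ["qlty"]) and has_kw(t, ["null"])]
--         t_range = [t for t in tools if has_kw(t, ["qlty"]) and has_kw(t, ["range"])]
--         t_uniq  = [t for t in tools if has_kw(t, ["qlty"]) and has_kw(t, ["unique", "distinct"])]
--     return (
--         (t_null[0]  if t_null  else None),
--         (t_range[0] if t_range else None),
--         (t_uniq[0]  if t_uniq  else None),
--     )
-- ===== SOURCE B (Python) =====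
-- from typing import Any, Dict, List
--
-- def pick_quality_tools(tools: List[Dict[str, Any]]):
--     def has_kw(t: Dict[str, Any], kws: List[str]) -> bool:
--         name = (t.get("name") or "").lower()
--         desc = (t.get("description") or "").lower()
--         return any(k in name or k in desc for k in kws)
--     preds = [
--         lambda t: has_kw(t, ["qlty", "quality"]) and has_kw(t, ["null", "missing"]),
--         lambda t: has_kw(t, ["qlty", "quality"]) and has_kw(t, ["range", "min", "max"]),
--         lambda t: has_kw(t, ["qlty", "quality"]) and has_kw(t, ["unique", "uniqueness", "distinct"]),
--         lambda t: has_kw(t, ["qlty"]) and has_kw(t, ["null"]),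
--         lambda t: has_kw(t, ["qlty"]) and has_kw(t, ["range"]),
--         lambda t: has_kw(t, ["qlty"]) and has_kw(t, ["unique", "distinct"]),
--     ]
--     slots = [None] * 6
--     for t in tools:
--         for i, p in enumerate(preds):
--             if slots[i] is None and p(t):
--                 slots[i] = t
--     if slots[0] is None and slots[1] is None and slots[2] is None:
--         return (slots[3], slots[4], slots[5])
--     return (slots[0], slots[1], slots[2])
-- ===== Notes on version B (the rewrite author's own statement) =====
-- stated objective: alternative
-- what changed: Replaces the six list-comprehension filters over the whole tools list (each materialising a filtered list just to take its head) with one single pass that keeps six first-match slots and picks strict or fallback slots at the end.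
import Mathlib
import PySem

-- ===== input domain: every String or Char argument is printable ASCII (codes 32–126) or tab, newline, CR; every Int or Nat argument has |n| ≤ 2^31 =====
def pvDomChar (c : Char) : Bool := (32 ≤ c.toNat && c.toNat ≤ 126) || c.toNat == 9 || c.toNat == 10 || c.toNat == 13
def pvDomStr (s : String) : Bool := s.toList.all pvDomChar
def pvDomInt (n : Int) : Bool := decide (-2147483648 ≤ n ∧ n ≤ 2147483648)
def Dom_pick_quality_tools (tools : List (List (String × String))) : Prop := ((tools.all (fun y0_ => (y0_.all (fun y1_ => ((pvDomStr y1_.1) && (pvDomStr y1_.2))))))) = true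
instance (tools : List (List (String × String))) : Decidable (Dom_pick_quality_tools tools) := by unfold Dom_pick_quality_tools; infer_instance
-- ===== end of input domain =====

-- B changes only the traversal: one pass with six first-match slots instead of six filtered lists; same keyword logic (objective: alternative).

-- ===== PORT A =====
-- inner helper has_kw: '(t.get(k) or "").lower()' — values are strings, so 'or ""' only replaces a missing key
def pqHasKw (t : List (String × String)) (kws : List String) : Bool :=
  let name := PySem.Str.lower ((PySem.Dict.ofList t).getD "name" "")
  let desc := PySem.Str.lower ((PySem.Dict.ofList t).getD "description" "")
  kws.any (fun k => PySem.Str.isIn k name || PySem.Str.isIn k desc)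

def pick_quality_tools (tools : List (List (String × String))) : (Option (List (String × String))) × (Option (List (String × String))) × (Option (List (String × String))) :=
  let t_null  := tools.filter (fun t => pqHasKw t ["qlty", "quality"] && pqHasKw t ["null", "missing"])
  let t_range := tools.filter (fun t => pqHasKw t ["qlty", "quality"] && pqHasKw t ["range", "min", "max"])
  let t_uniq  := tools.filter (fun t => pqHasKw t ["qlty", "quality"] && pqHasKw t ["unique", "uniqueness", "distinct"])
  if t_null.isEmpty && t_range.isEmpty && t_uniq.isEmpty then
    let t_null  := tools.filter (fun t => pqHasKw t ["qlty"] && pqHasKw t ["null"])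
    let t_range := tools.filter (fun t => pqHasKw t ["qlty"] && pqHasKw t ["range"])
    let t_uniq  := tools.filter (fun t => pqHasKw t ["qlty"] && pqHasKw t ["unique", "distinct"])
    (t_null.head?, t_range.head?, t_uniq.head?)
  else
    (t_null.head?, t_range.head?, t_uniq.head?)

-- ===== PORT B =====
-- the six strict/fallback predicates, in B's order
def pqPred (i : Nat) (t : List (String × String)) : Bool :=
  match i with
  | 0 => pqHasKw t ["qlty", "quality"] && pqHasKw t ["null", "missing"]
  | 1 => pqHasKw t ["qlty", "quality"] && pqHasKw t ["range", "min", "max"]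
  | 2 => pqHasKw t ["qlty", "quality"] && pqHasKw t ["unique", "uniqueness", "distinct"]
  | 3 => pqHasKw t ["qlty"] && pqHasKw t ["null"]
  | 4 => pqHasKw t ["qlty"] && pqHasKw t ["range"]
  | _ => pqHasKw t ["qlty"] && pqHasKw t ["unique", "distinct"]

-- 'if slots[i] is None and p(t): slots[i] = t'
def pqUpd (i : Nat) (o : Option (List (String × String))) (t : List (String × String)) : Option (List (String × String)) :=
  if o.isNone && pqPred i t then some t else o

abbrev PQState := Option (List (String × String)) × Option (List (String × String)) × Option (List (String × String)) × Option (List (String × String)) × Option (List (String × String)) × Option (List (String × String))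

def pqStep (s : PQState) (t : List (String × String)) : PQState :=
  (pqUpd 0 s.1 t, pqUpd 1 s.2.1 t, pqUpd 2 s.2.2.1 t, pqUpd 3 s.2.2.2.1 t, pqUpd 4 s.2.2.2.2.1 t, pqUpd 5 s.2.2.2.2.2 t)

def pick_quality_tools_alt (tools : List (List (String × String))) : (Option (List (String × String))) × (Option (List (String × String))) × (Option (List (String × String))) :=
  let s := tools.foldl pqStep (none, none, none, none, none, none)
  if s.1.isNone && s.2.1.isNone && s.2.2.1.isNone then
    (s.2.2.2.1, s.2.2.2.2.1, s.2.2.2.2.2)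
  else
    (s.1, s.2.1, s.2.2.1)

-- ===== PRECONDITION & SPEC =====
def Spec_pick_quality_tools (tools : List (List (String × String))) (out : (Option (List (String × String))) × (Option (List (String × String))) × (Option (List (String × String)))) : Prop := out = pick_quality_tools_alt tools
instance (tools : List (List (String × String))) (out : (Option (List (String × String))) × (Option (List (String × String))) × (Option (List (String × String)))) : Decidable (Spec_pick_quality_tools tools out) := by unfold Spec_pick_quality_tools; infer_instance

-- ===== CLAIM (what is proved, stated in full; the proofs are below) =====
def Claim_equal_pick_quality_tools : Prop := ∀ (tools : List (List (String × String))), Dom_pick_quality_tools tools → Spec_pick_quality_tools tools (pick_quality_tools tools)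

-- ===== LEMMAS AND PROOFS =====

-- a filled slot never changes
theorem pqFold_some (i : Nat) (ts : List (List (String × String))) (x : List (String × String)) :
    ts.foldl (pqUpd i) (some x) = some x := by
  induction ts with
  | nil => rfl
  | cons t ts ih => simp [List.foldl_cons, pqUpd, ih]

-- a single slot computes the first match
theorem pqFold_none (i : Nat) (ts : List (List (String × String))) :
    ts.foldl (pqUpd i) none = (ts.filter (pqPred i)).head? := by
  induction ts with
  | nil => rfl
  | cons t ts ih =>
    by_cases h : pqPred i t
    · simp [List.foldl_cons, pqUpd, h, pqFold_some]
    · simp [List.foldl_cons, pqUpd, h, ih]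

-- the 6-tuple fold is six independent slot folds
theorem pqFold_split (ts : List (List (String × String))) (s : PQState) :
    ts.foldl pqStep s =
      (ts.foldl (pqUpd 0) s.1, ts.foldl (pqUpd 1) s.2.1, ts.foldl (pqUpd 2) s.2.2.1,
       ts.foldl (pqUpd 3) s.2.2.2.1, ts.foldl (pqUpd 4) s.2.2.2.2.1, ts.foldl (pqUpd 5) s.2.2.2.2.2) := by
  induction ts generalizing s with
  | nil => rfl
  | cons t ts ih => simp [List.foldl_cons, ih, pqStep]

theorem head?_isNone_iff_isEmpty (l : List (List (String × String))) :
    l.head?.isNone = l.isEmpty := by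
  cases l <;> rfl

-- ===== VERDICT (by name: the statement is the Claim_ definition above) =====
theorem pick_quality_tools_spec : Claim_equal_pick_quality_tools := by
  intro tools _
  show pick_quality_tools tools = pick_quality_tools_alt tools
  unfold pick_quality_tools pick_quality_tools_alt
  simp only [pqFold_split, pqFold_none, head?_isNone_iff_isEmpty]
  rfl
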